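-- pv_equiv track=rewrite | github.com/samueltan97/dna_analysis | RecombinationPoint.py | build_processed_chromosome_data
-- ===== SOURCE A (Python) =====
-- def build_processed_chromosome_data(chromosome):
--     chromosome_data = {"T": [], "A": [], "C": [], "G": [], "TDiff": [], "ADiff": [], "CDiff": [], "GDiff": []}
--     for i in range(len(chromosome)):
--         chromosome_data[chromosome[i]].append(i)
--     for chromosome_type in ["T", "A", "C", "G"]:
--         for i in range(len(chromosome_data[chromosome_type]) - 1):
--             chromosome_data[chromosome_type + "Diff"].append(chromosome_data[chromosome_type][i + 1] - chromosome_data[chromosome_type][i])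
--     return chromosome_data
-- ===== SOURCE B (Python) =====
-- def build_processed_chromosome_data(chromosome):
--     chromosome_data = {"T": [], "A": [], "C": [], "G": [], "TDiff": [], "ADiff": [], "CDiff": [], "GDiff": []}
--     last = {}
--     for i, base in enumerate(chromosome):
--         chromosome_data[base].append(i)
--         if base in ("T", "A", "C", "G"):
--             if base in last:
--                 chromosome_data[base + "Diff"].append(i - last[base])
--             last[base] = i
--     return chromosome_data
-- ===== Notes on version B (the rewrite author's own statement) =====
-- stated objective: simpler
-- what changed: B fuses A's two passes (bucket indices, then rescan each bucket for gaps) into a single enumerate pass that tracks the last index seen per base and emits each gap on the fly.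
-- outside the precondition, e.g. on build_processed_chromosome_data(['X']): A raises KeyError, B raises KeyError
import Mathlib
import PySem

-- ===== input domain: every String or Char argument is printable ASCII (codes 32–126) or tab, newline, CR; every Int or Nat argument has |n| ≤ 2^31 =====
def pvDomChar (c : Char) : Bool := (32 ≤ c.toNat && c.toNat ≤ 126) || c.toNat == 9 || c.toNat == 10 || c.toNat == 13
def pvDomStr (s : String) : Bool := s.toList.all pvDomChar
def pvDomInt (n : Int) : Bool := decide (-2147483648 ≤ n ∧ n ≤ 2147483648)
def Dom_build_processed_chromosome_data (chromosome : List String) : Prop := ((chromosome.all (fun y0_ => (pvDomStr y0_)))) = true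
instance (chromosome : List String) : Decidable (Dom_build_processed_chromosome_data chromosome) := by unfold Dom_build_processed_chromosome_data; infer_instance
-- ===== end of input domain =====

-- B fuses A's two passes (bucket indices per base, then rescan each bucket for gaps) into one
-- enumerate pass tracking the last index seen per base; same return value on chromosomes of the four bases.

-- ===== PORT A =====
-- A's second pass, one base at a time: append adjacent differences of the base's bucket to its Diff bucket
def pvDiffStepA (d : PySem.Dict String (List Int)) (ct : String) : PySem.Dict String (List Int) :=
  (PySem.List.pyRange 0 (((d.getD ct []).length : Int) - 1) 1).foldl
    (fun d' i => d'.modify (ct ++ "Diff") []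
      (· ++ [PySem.List.pyGetD (d'.getD ct []) (i + 1) 0 - PySem.List.pyGetD (d'.getD ct []) i 0])) d

def build_processed_chromosome_data (chromosome : List String) : List (String × List Int) :=
  let d0 : PySem.Dict String (List Int) := PySem.Dict.ofList
    [("T", []), ("A", []), ("C", []), ("G", []), ("TDiff", []), ("ADiff", []), ("CDiff", []), ("GDiff", [])]
  let d1 := (PySem.List.pyRange 0 (chromosome.length : Int) 1).foldl
    (fun d i => d.modify (PySem.List.pyGetD chromosome i "") [] (· ++ [i])) d0
  let d2 := ["T", "A", "C", "G"].foldl pvDiffStepA d1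
  d2.items

-- ===== PORT B =====
-- B's loop body: bucket the index, emit the gap to the last occurrence if any, remember the index
def pvStepB (st : PySem.Dict String (List Int) × PySem.Dict String Int) (p : Int × String) :
    PySem.Dict String (List Int) × PySem.Dict String Int :=
  let d := st.1.modify p.2 [] (· ++ [p.1])
  if p.2 ∈ (["T", "A", "C", "G"] : List String) then
    let d := if st.2.contains p.2 then d.modify (p.2 ++ "Diff") [] (· ++ [p.1 - st.2.getD p.2 0]) else d
    (d, st.2.insert p.2 p.1)
  else (d, st.2)

def build_processed_chromosome_data_alt (chromosome : List String) : List (String × List Int) :=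
  let d0 : PySem.Dict String (List Int) := PySem.Dict.ofList
    [("T", []), ("A", []), ("C", []), ("G", []), ("TDiff", []), ("ADiff", []), ("CDiff", []), ("GDiff", [])]
  let st := (PySem.List.enumerate chromosome 0).foldl pvStepB (d0, PySem.Dict.empty)
  st.1.items

-- ===== PRECONDITION & SPEC =====
-- suffix of xs strictly after the first / second occurrence of c (input-inspection helpers for Pre_)
def afterFirst (xs : List String) (c : String) : List String :=
  match xs with
  | [] => []
  | x :: t => if x = c then t else afterFirst t c

def afterSecond (xs : List String) (c : String) : List String :=
  match xs with
  | [] => []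
  | x :: t => if x = c then afterFirst t c else afterSecond t c

-- Pre_ excludes (a) chromosomes with a string outside the dict's 8 keys, on which A raises KeyError, and
-- (b) chromosomes where a 'Diff' dict key occurs as an element after the second occurrence of its base:
-- there A's dict-indexing accident puts that raw index into the diff bucket BEFORE gaps computed later,
-- while B's fused pass orders the same entries by position — both orders are artefacts of a non-DNA input.
def Pre_build_processed_chromosome_data (chromosome : List String) : Prop :=
  (∀ s ∈ chromosome, s ∈ (["T", "A", "C", "G", "TDiff", "ADiff", "CDiff", "GDiff"] : List String)) ∧
  "TDiff" ∉ afterSecond chromosome "T" ∧ "ADiff" ∉ afterSecond chromosome "A" ∧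
  "CDiff" ∉ afterSecond chromosome "C" ∧ "GDiff" ∉ afterSecond chromosome "G"
instance (chromosome : List String) : Decidable (Pre_build_processed_chromosome_data chromosome) := by
  unfold Pre_build_processed_chromosome_data; infer_instance

def pvWitness_build_processed_chromosome_data : List String := ["T", "TDiff", "A", "T", "G", "T"]

def Spec_build_processed_chromosome_data (chromosome : List String) (out : List (String × List Int)) : Prop :=
  out = build_processed_chromosome_data_alt chromosome
instance (chromosome : List String) (out : List (String × List Int)) : Decidable (Spec_build_processed_chromosome_data chromosome out) := by unfold Spec_build_processed_chromosome_data; infer_instance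

-- ===== CLAIM (what is proved, stated in full; the proofs are below) =====
def Claim_equal_build_processed_chromosome_data : Prop := ∀ (chromosome : List String), Dom_build_processed_chromosome_data chromosome → Pre_build_processed_chromosome_data chromosome → Spec_build_processed_chromosome_data chromosome (build_processed_chromosome_data chromosome)

-- ===== LEMMAS AND PROOFS =====
theorem pyGetD_cons_shift (x : Int) (xs : List Int) (k : Int) (hk : 0 ≤ k) (d : Int) :
    PySem.List.pyGetD (x :: xs) (k + 1) d = PySem.List.pyGetD xs k d := by
  obtain ⟨n, rfl⟩ := Int.eq_ofNat_of_zero_le hk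
  have h1 : ((n:Int) + 1) = ((n+1 : Nat) : Int) := by push_cast; ring
  rw [h1, PySem.List.pyGetD_natCast, PySem.List.pyGetD_natCast, List.getD_cons_succ]
def adjDiffs : List Int → List Int
  | [] => []
  | [_] => []
  | a :: b :: t => (b - a) :: adjDiffs (b :: t)
theorem adjDiffs_eq (l : List Int) :
    (PySem.List.pyRange 0 ((l.length : Int) - 1) 1).map
        (fun i => PySem.List.pyGetD l (i + 1) 0 - PySem.List.pyGetD l i 0) = adjDiffs l := by
  induction l with
  | nil => rw [PySem.List.pyRange_one_eq_nil (by simp)]; rfl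
  | cons a t ih =>
    cases t with
    | nil => rw [PySem.List.pyRange_one_eq_nil (by simp)]; rfl
    | cons b t' =>
      have hlen : (((a :: b :: t').length : Int) - 1) = ((t'.length + 1 : Nat) : Int) := by
        push_cast [List.length_cons]; ring
      have hlen' : (((b :: t').length : Int) - 1) = ((t'.length : Nat) : Int) := by simp
      rw [hlen', PySem.List.pyRange_one] at ih
      rw [hlen, PySem.List.pyRange_one]
      simp only [Int.sub_zero, Int.toNat_natCast] at *
      rw [List.range_succ_eq_map]
      simp only [List.map_cons, List.map_map]
      show _ :: _ = _ :: _
      congr 1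
      · -- head: pyGetD l (0+0+1) - pyGetD l (0+0) = b - a
        have h0 : PySem.List.pyGetD (a :: b :: t') ((0:Int) + 1) 0 = b := by
          rw [pyGetD_cons_shift _ _ 0 le_rfl, PySem.List.pyGetD_zero_cons]
        norm_num at h0
        simp [PySem.List.pyGetD_zero_cons, h0]
      · rw [List.map_map] at ih
        rw [← ih]
        apply List.map_congr_left
        intro k _
        simp only [Function.comp]
        have c1 : (0:Int) + ((k.succ : Nat) : Int) = ((k:Int) + 1) := by push_cast; ring
        have c2 : (0:Int) + ((k : Nat) : Int) = (k:Int) := by ring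
        rw [c1, c2, pyGetD_cons_shift a (b :: t') ((k:Int)+1) (by positivity), pyGetD_cons_shift a (b :: t') (k:Int) (by positivity)]
def mk8 (t a c g td ad cd gd : List Int) : PySem.Dict String (List Int) :=
  PySem.Dict.mk [("T", t), ("A", a), ("C", c), ("G", g), ("TDiff", td), ("ADiff", ad), ("CDiff", cd), ("GDiff", gd)]

theorem modify_mk8_T (t a c g td ad cd gd : List Int) (f : List Int → List Int) :
    (mk8 t a c g td ad cd gd).modify "T" [] f = mk8 (f t) a c g td ad cd gd := rfl
theorem modify_mk8_A (t a c g td ad cd gd : List Int) (f : List Int → List Int) :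
    (mk8 t a c g td ad cd gd).modify "A" [] f = mk8 t (f a) c g td ad cd gd := rfl
theorem modify_mk8_C (t a c g td ad cd gd : List Int) (f : List Int → List Int) :
    (mk8 t a c g td ad cd gd).modify "C" [] f = mk8 t a (f c) g td ad cd gd := rfl
theorem modify_mk8_G (t a c g td ad cd gd : List Int) (f : List Int → List Int) :
    (mk8 t a c g td ad cd gd).modify "G" [] f = mk8 t a c (f g) td ad cd gd := rfl
theorem modify_mk8_TD (t a c g td ad cd gd : List Int) (f : List Int → List Int) :
    (mk8 t a c g td ad cd gd).modify ("T" ++ "Diff") [] f = mk8 t a c g (f td) ad cd gd := rfl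
theorem modify_mk8_AD (t a c g td ad cd gd : List Int) (f : List Int → List Int) :
    (mk8 t a c g td ad cd gd).modify ("A" ++ "Diff") [] f = mk8 t a c g td (f ad) cd gd := rfl
theorem modify_mk8_CD (t a c g td ad cd gd : List Int) (f : List Int → List Int) :
    (mk8 t a c g td ad cd gd).modify ("C" ++ "Diff") [] f = mk8 t a c g td ad (f cd) gd := rfl
theorem modify_mk8_GD (t a c g td ad cd gd : List Int) (f : List Int → List Int) :
    (mk8 t a c g td ad cd gd).modify ("G" ++ "Diff") [] f = mk8 t a c g td ad cd (f gd) := rfl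
theorem modify_mk8_TD_lit (t a c g td ad cd gd : List Int) (f : List Int → List Int) :
    (mk8 t a c g td ad cd gd).modify "TDiff" [] f = mk8 t a c g (f td) ad cd gd := rfl
theorem modify_mk8_AD_lit (t a c g td ad cd gd : List Int) (f : List Int → List Int) :
    (mk8 t a c g td ad cd gd).modify "ADiff" [] f = mk8 t a c g td (f ad) cd gd := rfl
theorem modify_mk8_CD_lit (t a c g td ad cd gd : List Int) (f : List Int → List Int) :
    (mk8 t a c g td ad cd gd).modify "CDiff" [] f = mk8 t a c g td ad (f cd) gd := rfl
theorem modify_mk8_GD_lit (t a c g td ad cd gd : List Int) (f : List Int → List Int) :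
    (mk8 t a c g td ad cd gd).modify "GDiff" [] f = mk8 t a c g td ad cd (f gd) := rfl
theorem getD_mk8_T (t a c g td ad cd gd : List Int) : (mk8 t a c g td ad cd gd).getD "T" [] = t := rfl
theorem getD_mk8_A (t a c g td ad cd gd : List Int) : (mk8 t a c g td ad cd gd).getD "A" [] = a := rfl
theorem getD_mk8_C (t a c g td ad cd gd : List Int) : (mk8 t a c g td ad cd gd).getD "C" [] = c := rfl
theorem getD_mk8_G (t a c g td ad cd gd : List Int) : (mk8 t a c g td ad cd gd).getD "G" [] = g := rfl
theorem inner_T (R : List Int) : ∀ (t a c g td ad cd gd : List Int),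
    R.foldl (fun d' i => d'.modify ("T" ++ "Diff") []
        (· ++ [PySem.List.pyGetD (d'.getD "T" []) (i + 1) 0 - PySem.List.pyGetD (d'.getD "T" []) i 0]))
      (mk8 t a c g td ad cd gd)
    = mk8 t a c g (td ++ R.map (fun i => PySem.List.pyGetD t (i + 1) 0 - PySem.List.pyGetD t i 0)) ad cd gd := by
  induction R with
  | nil => intro t a c g td ad cd gd; simp
  | cons r R ih =>
    intro t a c g td ad cd gd
    rw [List.foldl_cons]
    show R.foldl _ ((mk8 t a c g td ad cd gd).modify ("T" ++ "Diff") [] _) = _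
    rw [getD_mk8_T, modify_mk8_TD, ih]
    simp
theorem diffStepA_T (t a c g td ad cd gd : List Int) :
    pvDiffStepA (mk8 t a c g td ad cd gd) "T" = mk8 t a c g (td ++ adjDiffs t) ad cd gd := by
  unfold pvDiffStepA
  rw [getD_mk8_T, inner_T, adjDiffs_eq]
theorem inner_A (R : List Int) : ∀ (t a c g td ad cd gd : List Int),
    R.foldl (fun d' i => d'.modify ("A" ++ "Diff") []
        (· ++ [PySem.List.pyGetD (d'.getD "A" []) (i + 1) 0 - PySem.List.pyGetD (d'.getD "A" []) i 0]))
      (mk8 t a c g td ad cd gd)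
    = mk8 t a c g td (ad ++ R.map (fun i => PySem.List.pyGetD a (i + 1) 0 - PySem.List.pyGetD a i 0)) cd gd := by
  induction R with
  | nil => intro t a c g td ad cd gd; simp
  | cons r R ih =>
    intro t a c g td ad cd gd
    rw [List.foldl_cons]
    show R.foldl _ ((mk8 t a c g td ad cd gd).modify ("A" ++ "Diff") [] _) = _
    rw [getD_mk8_A, modify_mk8_AD, ih]
    simp

theorem diffStepA_A (t a c g td ad cd gd : List Int) :
    pvDiffStepA (mk8 t a c g td ad cd gd) "A" = mk8 t a c g td (ad ++ adjDiffs a) cd gd := by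
  unfold pvDiffStepA
  rw [getD_mk8_A, inner_A, adjDiffs_eq]

theorem inner_C (R : List Int) : ∀ (t a c g td ad cd gd : List Int),
    R.foldl (fun d' i => d'.modify ("C" ++ "Diff") []
        (· ++ [PySem.List.pyGetD (d'.getD "C" []) (i + 1) 0 - PySem.List.pyGetD (d'.getD "C" []) i 0]))
      (mk8 t a c g td ad cd gd)
    = mk8 t a c g td ad (cd ++ R.map (fun i => PySem.List.pyGetD c (i + 1) 0 - PySem.List.pyGetD c i 0)) gd := by
  induction R with
  | nil => intro t a c g td ad cd gd; simp
  | cons r R ih =>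
    intro t a c g td ad cd gd
    rw [List.foldl_cons]
    show R.foldl _ ((mk8 t a c g td ad cd gd).modify ("C" ++ "Diff") [] _) = _
    rw [getD_mk8_C, modify_mk8_CD, ih]
    simp

theorem diffStepA_C (t a c g td ad cd gd : List Int) :
    pvDiffStepA (mk8 t a c g td ad cd gd) "C" = mk8 t a c g td ad (cd ++ adjDiffs c) gd := by
  unfold pvDiffStepA
  rw [getD_mk8_C, inner_C, adjDiffs_eq]

theorem inner_G (R : List Int) : ∀ (t a c g td ad cd gd : List Int),
    R.foldl (fun d' i => d'.modify ("G" ++ "Diff") []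
        (· ++ [PySem.List.pyGetD (d'.getD "G" []) (i + 1) 0 - PySem.List.pyGetD (d'.getD "G" []) i 0]))
      (mk8 t a c g td ad cd gd)
    = mk8 t a c g td ad cd (gd ++ R.map (fun i => PySem.List.pyGetD g (i + 1) 0 - PySem.List.pyGetD g i 0)) := by
  induction R with
  | nil => intro t a c g td ad cd gd; simp
  | cons r R ih =>
    intro t a c g td ad cd gd
    rw [List.foldl_cons]
    show R.foldl _ ((mk8 t a c g td ad cd gd).modify ("G" ++ "Diff") [] _) = _
    rw [getD_mk8_G, modify_mk8_GD, ih]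
    simp

theorem diffStepA_G (t a c g td ad cd gd : List Int) :
    pvDiffStepA (mk8 t a c g td ad cd gd) "G" = mk8 t a c g td ad cd (gd ++ adjDiffs g) := by
  unfold pvDiffStepA
  rw [getD_mk8_G, inner_G, adjDiffs_eq]
def posF (s : Int) (xs : List String) (c : String) : List Int :=
  ((PySem.List.enumerate xs s).filter (fun p => p.2 == c)).map (·.1)

theorem posF_cons (s : Int) (x : String) (xs : List String) (c : String) :
    posF s (x :: xs) c = (if x == c then [s] else []) ++ posF (s + 1) xs c := by
  unfold posF
  rw [PySem.List.enumerate_cons]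
  by_cases h : x == c <;> simp [List.filter, h]
theorem A_loop1 (xs : List String) (hxs : ∀ x ∈ xs, x ∈ (["T","A","C","G","TDiff","ADiff","CDiff","GDiff"] : List String)) :
    ∀ (s : Int) (t a c g td ad cd gd : List Int),
    (PySem.List.enumerate xs s).foldl (fun d p => d.modify p.2 [] (· ++ [p.1])) (mk8 t a c g td ad cd gd)
      = mk8 (t ++ posF s xs "T") (a ++ posF s xs "A") (c ++ posF s xs "C") (g ++ posF s xs "G")
          (td ++ posF s xs "TDiff") (ad ++ posF s xs "ADiff") (cd ++ posF s xs "CDiff") (gd ++ posF s xs "GDiff") := by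
  induction xs with
  | nil => intros; simp [posF]
  | cons x xs ih =>
    intro s t a c g td ad cd gd
    have hx := hxs x (by simp)
    have hxs' : ∀ y ∈ xs, y ∈ (["T","A","C","G","TDiff","ADiff","CDiff","GDiff"] : List String) :=
      fun y hy => hxs y (List.mem_cons_of_mem _ hy)
    rw [PySem.List.enumerate_cons, List.foldl_cons]
    simp only [List.mem_cons, List.not_mem_nil, or_false] at hx
    rcases hx with rfl | rfl | rfl | rfl | rfl | rfl | rfl | rfl <;>
      · show (PySem.List.enumerate xs (s+1)).foldl _ ((mk8 t a c g td ad cd gd).modify _ [] (· ++ [s])) = _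
        first
          | rw [modify_mk8_T] | rw [modify_mk8_A] | rw [modify_mk8_C] | rw [modify_mk8_G]
          | rw [modify_mk8_TD_lit] | rw [modify_mk8_AD_lit] | rw [modify_mk8_CD_lit] | rw [modify_mk8_GD_lit]
        rw [ih hxs']
        simp [posF_cons]

def adjTail (o : Option Int) (l : List Int) : List Int := adjDiffs (o.toList ++ l)

theorem adjTail_some_cons (p x : Int) (l : List Int) :
    adjTail (some p) (x :: l) = (x - p) :: adjTail (some x) l := rfl
theorem adjTail_none_cons (x : Int) (l : List Int) :
    adjTail none (x :: l) = adjTail (some x) l := rfl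

theorem adjTail_none (l : List Int) : adjTail none l = adjDiffs l := rfl
theorem afterFirst_cons_self (t : List String) (c : String) : afterFirst (c :: t) c = t := by
  simp [afterFirst]

theorem afterFirst_cons_ne (x c : String) (t : List String) (h : x ≠ c) :
    afterFirst (x :: t) c = afterFirst t c := by simp [afterFirst, h]

theorem afterSecond_cons_self (t : List String) (c : String) : afterSecond (c :: t) c = afterFirst t c := by
  simp [afterSecond]

theorem afterSecond_cons_ne (x c : String) (t : List String) (h : x ≠ c) :
    afterSecond (x :: t) c = afterSecond t c := by simp [afterSecond, h]

theorem mem_of_mem_afterFirst (y : String) (xs : List String) (c : String)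
    (h : y ∈ afterFirst xs c) : y ∈ xs := by
  induction xs with
  | nil => simp [afterFirst] at h
  | cons x t ih =>
    by_cases hx : x = c
    · subst hx; rw [afterFirst_cons_self] at h; exact List.mem_cons_of_mem _ h
    · rw [afterFirst_cons_ne x c t hx] at h; exact List.mem_cons_of_mem _ (ih h)

theorem posF_nil_of_not_mem (s : Int) (xs : List String) (c : String) (h : c ∉ xs) :
    posF s xs c = [] := by
  induction xs generalizing s with
  | nil => rfl
  | cons x t ih =>
    simp only [List.mem_cons, not_or] at h
    rw [posF_cons, if_neg (by simp only [beq_iff_eq]; exact fun e => h.1 e.symm), ih _ h.2]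
    rfl

theorem get?_of_contains_true (last : PySem.Dict String Int) (k : String) (hc : last.contains k = true) :
    last.get? k = some (last.getD k 0) := by
  have h := PySem.Dict.contains_eq_isSome_get? (d := last) (k := k)
  rw [hc] at h
  obtain ⟨v, hv⟩ := Option.isSome_iff_exists.mp h.symm
  rw [hv, PySem.Dict.getD_eq_get?_getD, hv]; rfl

theorem get?_of_contains_false (last : PySem.Dict String Int) (k : String) (hc : last.contains k = false) :
    last.get? k = none := by
  have h := PySem.Dict.contains_eq_isSome_get? (d := last) (k := k)
  rw [hc] at h
  cases hv : last.get? k with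
  | none => rfl
  | some v => rw [hv] at h; simp at h

theorem adjDiffs_toList (o : Option Int) : adjDiffs o.toList = [] := by cases o <;> rfl

theorem B_loop (xs : List String) (hxs : ∀ x ∈ xs, x ∈ (["T","A","C","G","TDiff","ADiff","CDiff","GDiff"] : List String)) :
    ∀ (s : Int) (t a c g td ad cd gd : List Int) (last : PySem.Dict String Int),
    "TDiff" ∉ (if last.contains "T" then afterFirst xs "T" else afterSecond xs "T") →
    "ADiff" ∉ (if last.contains "A" then afterFirst xs "A" else afterSecond xs "A") →
    "CDiff" ∉ (if last.contains "C" then afterFirst xs "C" else afterSecond xs "C") →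
    "GDiff" ∉ (if last.contains "G" then afterFirst xs "G" else afterSecond xs "G") →
    ((PySem.List.enumerate xs s).foldl pvStepB (mk8 t a c g td ad cd gd, last)).1
      = mk8 (t ++ posF s xs "T") (a ++ posF s xs "A") (c ++ posF s xs "C") (g ++ posF s xs "G")
          (td ++ (posF s xs "TDiff" ++ adjTail (last.get? "T") (posF s xs "T")))
          (ad ++ (posF s xs "ADiff" ++ adjTail (last.get? "A") (posF s xs "A")))
          (cd ++ (posF s xs "CDiff" ++ adjTail (last.get? "C") (posF s xs "C")))
          (gd ++ (posF s xs "GDiff" ++ adjTail (last.get? "G") (posF s xs "G"))) := by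
  induction xs with
  | nil => intros; simp [posF, adjTail, adjDiffs_toList]
  | cons x xs ih =>
    intro s t a c g td ad cd gd last hT hA hC hG
    have hx := hxs x (by simp)
    have hxs' : ∀ y ∈ xs, y ∈ (["T","A","C","G","TDiff","ADiff","CDiff","GDiff"] : List String) := fun y hy => hxs y (List.mem_cons_of_mem _ hy)
    rw [PySem.List.enumerate_cons, List.foldl_cons]
    simp only [List.mem_cons, List.not_mem_nil, or_false] at hx
    rcases hx with rfl | rfl | rfl | rfl | rfl | rfl | rfl | rfl
    · simp only [pvStepB]
      rw [if_pos (show ("T":String) ∈ (["T","A","C","G"] : List String) by decide)]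
      by_cases hc : last.contains "T" = true
      · simp only [hc, if_true]
        have hself : "TDiff" ∉ xs := by simpa [hc, afterFirst_cons_self] using hT
        have hT' : "TDiff" ∉ (if (last.insert "T" s).contains "T" then afterFirst xs "T" else afterSecond xs "T") := by
          simp only [PySem.Dict.contains_insert_self, if_true]
          exact fun hm => hself (mem_of_mem_afterFirst _ _ _ hm)
        have hA' : "ADiff" ∉ (if (last.insert "T" s).contains "A" then afterFirst xs "A" else afterSecond xs "A") := by
          simpa [PySem.Dict.contains_insert, afterFirst_cons_ne "T" "A" xs (by decide),
            afterSecond_cons_ne "T" "A" xs (by decide)] using hA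
        have hC' : "CDiff" ∉ (if (last.insert "T" s).contains "C" then afterFirst xs "C" else afterSecond xs "C") := by
          simpa [PySem.Dict.contains_insert, afterFirst_cons_ne "T" "C" xs (by decide),
            afterSecond_cons_ne "T" "C" xs (by decide)] using hC
        have hG' : "GDiff" ∉ (if (last.insert "T" s).contains "G" then afterFirst xs "G" else afterSecond xs "G") := by
          simpa [PySem.Dict.contains_insert, afterFirst_cons_ne "T" "G" xs (by decide),
            afterSecond_cons_ne "T" "G" xs (by decide)] using hG
        rw [modify_mk8_T, modify_mk8_TD, ih hxs' (s+1) _ _ _ _ _ _ _ _ _ hT' hA' hC' hG']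
        rw [get?_of_contains_true _ _ hc]
        simp [posF_cons, posF_nil_of_not_mem _ _ _ hself, PySem.Dict.get?_insert_self,
          PySem.Dict.get?_insert_of_ne last s (show ("A":String) ≠ "T" by decide),
          PySem.Dict.get?_insert_of_ne last s (show ("C":String) ≠ "T" by decide),
          PySem.Dict.get?_insert_of_ne last s (show ("G":String) ≠ "T" by decide),
          adjTail_some_cons]
      · rw [if_neg hc]
        simp only [Bool.not_eq_true] at hc
        have hself : "TDiff" ∉ afterFirst xs "T" := by simpa [hc, afterSecond_cons_self] using hT
        have hT' : "TDiff" ∉ (if (last.insert "T" s).contains "T" then afterFirst xs "T" else afterSecond xs "T") := by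
          simpa only [PySem.Dict.contains_insert_self, if_true] using hself
        have hA' : "ADiff" ∉ (if (last.insert "T" s).contains "A" then afterFirst xs "A" else afterSecond xs "A") := by
          simpa [PySem.Dict.contains_insert, afterFirst_cons_ne "T" "A" xs (by decide),
            afterSecond_cons_ne "T" "A" xs (by decide)] using hA
        have hC' : "CDiff" ∉ (if (last.insert "T" s).contains "C" then afterFirst xs "C" else afterSecond xs "C") := by
          simpa [PySem.Dict.contains_insert, afterFirst_cons_ne "T" "C" xs (by decide),
            afterSecond_cons_ne "T" "C" xs (by decide)] using hC
        have hG' : "GDiff" ∉ (if (last.insert "T" s).contains "G" then afterFirst xs "G" else afterSecond xs "G") := by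
          simpa [PySem.Dict.contains_insert, afterFirst_cons_ne "T" "G" xs (by decide),
            afterSecond_cons_ne "T" "G" xs (by decide)] using hG
        rw [modify_mk8_T, ih hxs' (s+1) _ _ _ _ _ _ _ _ _ hT' hA' hC' hG']
        rw [get?_of_contains_false _ _ hc]
        simp [posF_cons, PySem.Dict.get?_insert_self,
          PySem.Dict.get?_insert_of_ne last s (show ("A":String) ≠ "T" by decide),
          PySem.Dict.get?_insert_of_ne last s (show ("C":String) ≠ "T" by decide),
          PySem.Dict.get?_insert_of_ne last s (show ("G":String) ≠ "T" by decide),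
          adjTail_none_cons]
    · simp only [pvStepB]
      rw [if_pos (show ("A":String) ∈ (["T","A","C","G"] : List String) by decide)]
      by_cases hc : last.contains "A" = true
      · simp only [hc, if_true]
        have hself : "ADiff" ∉ xs := by simpa [hc, afterFirst_cons_self] using hA
        have hA' : "ADiff" ∉ (if (last.insert "A" s).contains "A" then afterFirst xs "A" else afterSecond xs "A") := by
          simp only [PySem.Dict.contains_insert_self, if_true]
          exact fun hm => hself (mem_of_mem_afterFirst _ _ _ hm)
        have hT' : "TDiff" ∉ (if (last.insert "A" s).contains "T" then afterFirst xs "T" else afterSecond xs "T") := by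
          simpa [PySem.Dict.contains_insert, afterFirst_cons_ne "A" "T" xs (by decide),
            afterSecond_cons_ne "A" "T" xs (by decide)] using hT
        have hC' : "CDiff" ∉ (if (last.insert "A" s).contains "C" then afterFirst xs "C" else afterSecond xs "C") := by
          simpa [PySem.Dict.contains_insert, afterFirst_cons_ne "A" "C" xs (by decide),
            afterSecond_cons_ne "A" "C" xs (by decide)] using hC
        have hG' : "GDiff" ∉ (if (last.insert "A" s).contains "G" then afterFirst xs "G" else afterSecond xs "G") := by
          simpa [PySem.Dict.contains_insert, afterFirst_cons_ne "A" "G" xs (by decide),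
            afterSecond_cons_ne "A" "G" xs (by decide)] using hG
        rw [modify_mk8_A, modify_mk8_AD, ih hxs' (s+1) _ _ _ _ _ _ _ _ _ hT' hA' hC' hG']
        rw [get?_of_contains_true _ _ hc]
        simp [posF_cons, posF_nil_of_not_mem _ _ _ hself, PySem.Dict.get?_insert_self,
          PySem.Dict.get?_insert_of_ne last s (show ("T":String) ≠ "A" by decide),
          PySem.Dict.get?_insert_of_ne last s (show ("C":String) ≠ "A" by decide),
          PySem.Dict.get?_insert_of_ne last s (show ("G":String) ≠ "A" by decide),
          adjTail_some_cons]
      · rw [if_neg hc]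
        simp only [Bool.not_eq_true] at hc
        have hself : "ADiff" ∉ afterFirst xs "A" := by simpa [hc, afterSecond_cons_self] using hA
        have hA' : "ADiff" ∉ (if (last.insert "A" s).contains "A" then afterFirst xs "A" else afterSecond xs "A") := by
          simpa only [PySem.Dict.contains_insert_self, if_true] using hself
        have hT' : "TDiff" ∉ (if (last.insert "A" s).contains "T" then afterFirst xs "T" else afterSecond xs "T") := by
          simpa [PySem.Dict.contains_insert, afterFirst_cons_ne "A" "T" xs (by decide),
            afterSecond_cons_ne "A" "T" xs (by decide)] using hT
        have hC' : "CDiff" ∉ (if (last.insert "A" s).contains "C" then afterFirst xs "C" else afterSecond xs "C") := by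
          simpa [PySem.Dict.contains_insert, afterFirst_cons_ne "A" "C" xs (by decide),
            afterSecond_cons_ne "A" "C" xs (by decide)] using hC
        have hG' : "GDiff" ∉ (if (last.insert "A" s).contains "G" then afterFirst xs "G" else afterSecond xs "G") := by
          simpa [PySem.Dict.contains_insert, afterFirst_cons_ne "A" "G" xs (by decide),
            afterSecond_cons_ne "A" "G" xs (by decide)] using hG
        rw [modify_mk8_A, ih hxs' (s+1) _ _ _ _ _ _ _ _ _ hT' hA' hC' hG']
        rw [get?_of_contains_false _ _ hc]
        simp [posF_cons, PySem.Dict.get?_insert_self,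
          PySem.Dict.get?_insert_of_ne last s (show ("T":String) ≠ "A" by decide),
          PySem.Dict.get?_insert_of_ne last s (show ("C":String) ≠ "A" by decide),
          PySem.Dict.get?_insert_of_ne last s (show ("G":String) ≠ "A" by decide),
          adjTail_none_cons]
    · simp only [pvStepB]
      rw [if_pos (show ("C":String) ∈ (["T","A","C","G"] : List String) by decide)]
      by_cases hc : last.contains "C" = true
      · simp only [hc, if_true]
        have hself : "CDiff" ∉ xs := by simpa [hc, afterFirst_cons_self] using hC
        have hC' : "CDiff" ∉ (if (last.insert "C" s).contains "C" then afterFirst xs "C" else afterSecond xs "C") := by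
          simp only [PySem.Dict.contains_insert_self, if_true]
          exact fun hm => hself (mem_of_mem_afterFirst _ _ _ hm)
        have hT' : "TDiff" ∉ (if (last.insert "C" s).contains "T" then afterFirst xs "T" else afterSecond xs "T") := by
          simpa [PySem.Dict.contains_insert, afterFirst_cons_ne "C" "T" xs (by decide),
            afterSecond_cons_ne "C" "T" xs (by decide)] using hT
        have hA' : "ADiff" ∉ (if (last.insert "C" s).contains "A" then afterFirst xs "A" else afterSecond xs "A") := by
          simpa [PySem.Dict.contains_insert, afterFirst_cons_ne "C" "A" xs (by decide),
            afterSecond_cons_ne "C" "A" xs (by decide)] using hA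
        have hG' : "GDiff" ∉ (if (last.insert "C" s).contains "G" then afterFirst xs "G" else afterSecond xs "G") := by
          simpa [PySem.Dict.contains_insert, afterFirst_cons_ne "C" "G" xs (by decide),
            afterSecond_cons_ne "C" "G" xs (by decide)] using hG
        rw [modify_mk8_C, modify_mk8_CD, ih hxs' (s+1) _ _ _ _ _ _ _ _ _ hT' hA' hC' hG']
        rw [get?_of_contains_true _ _ hc]
        simp [posF_cons, posF_nil_of_not_mem _ _ _ hself, PySem.Dict.get?_insert_self,
          PySem.Dict.get?_insert_of_ne last s (show ("T":String) ≠ "C" by decide),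
          PySem.Dict.get?_insert_of_ne last s (show ("A":String) ≠ "C" by decide),
          PySem.Dict.get?_insert_of_ne last s (show ("G":String) ≠ "C" by decide),
          adjTail_some_cons]
      · rw [if_neg hc]
        simp only [Bool.not_eq_true] at hc
        have hself : "CDiff" ∉ afterFirst xs "C" := by simpa [hc, afterSecond_cons_self] using hC
        have hC' : "CDiff" ∉ (if (last.insert "C" s).contains "C" then afterFirst xs "C" else afterSecond xs "C") := by
          simpa only [PySem.Dict.contains_insert_self, if_true] using hself
        have hT' : "TDiff" ∉ (if (last.insert "C" s).contains "T" then afterFirst xs "T" else afterSecond xs "T") := by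
          simpa [PySem.Dict.contains_insert, afterFirst_cons_ne "C" "T" xs (by decide),
            afterSecond_cons_ne "C" "T" xs (by decide)] using hT
        have hA' : "ADiff" ∉ (if (last.insert "C" s).contains "A" then afterFirst xs "A" else afterSecond xs "A") := by
          simpa [PySem.Dict.contains_insert, afterFirst_cons_ne "C" "A" xs (by decide),
            afterSecond_cons_ne "C" "A" xs (by decide)] using hA
        have hG' : "GDiff" ∉ (if (last.insert "C" s).contains "G" then afterFirst xs "G" else afterSecond xs "G") := by
          simpa [PySem.Dict.contains_insert, afterFirst_cons_ne "C" "G" xs (by decide),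
            afterSecond_cons_ne "C" "G" xs (by decide)] using hG
        rw [modify_mk8_C, ih hxs' (s+1) _ _ _ _ _ _ _ _ _ hT' hA' hC' hG']
        rw [get?_of_contains_false _ _ hc]
        simp [posF_cons, PySem.Dict.get?_insert_self,
          PySem.Dict.get?_insert_of_ne last s (show ("T":String) ≠ "C" by decide),
          PySem.Dict.get?_insert_of_ne last s (show ("A":String) ≠ "C" by decide),
          PySem.Dict.get?_insert_of_ne last s (show ("G":String) ≠ "C" by decide),
          adjTail_none_cons]
    · simp only [pvStepB]
      rw [if_pos (show ("G":String) ∈ (["T","A","C","G"] : List String) by decide)]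
      by_cases hc : last.contains "G" = true
      · simp only [hc, if_true]
        have hself : "GDiff" ∉ xs := by simpa [hc, afterFirst_cons_self] using hG
        have hG' : "GDiff" ∉ (if (last.insert "G" s).contains "G" then afterFirst xs "G" else afterSecond xs "G") := by
          simp only [PySem.Dict.contains_insert_self, if_true]
          exact fun hm => hself (mem_of_mem_afterFirst _ _ _ hm)
        have hT' : "TDiff" ∉ (if (last.insert "G" s).contains "T" then afterFirst xs "T" else afterSecond xs "T") := by
          simpa [PySem.Dict.contains_insert, afterFirst_cons_ne "G" "T" xs (by decide),
            afterSecond_cons_ne "G" "T" xs (by decide)] using hT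
        have hA' : "ADiff" ∉ (if (last.insert "G" s).contains "A" then afterFirst xs "A" else afterSecond xs "A") := by
          simpa [PySem.Dict.contains_insert, afterFirst_cons_ne "G" "A" xs (by decide),
            afterSecond_cons_ne "G" "A" xs (by decide)] using hA
        have hC' : "CDiff" ∉ (if (last.insert "G" s).contains "C" then afterFirst xs "C" else afterSecond xs "C") := by
          simpa [PySem.Dict.contains_insert, afterFirst_cons_ne "G" "C" xs (by decide),
            afterSecond_cons_ne "G" "C" xs (by decide)] using hC
        rw [modify_mk8_G, modify_mk8_GD, ih hxs' (s+1) _ _ _ _ _ _ _ _ _ hT' hA' hC' hG']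
        rw [get?_of_contains_true _ _ hc]
        simp [posF_cons, posF_nil_of_not_mem _ _ _ hself, PySem.Dict.get?_insert_self,
          PySem.Dict.get?_insert_of_ne last s (show ("T":String) ≠ "G" by decide),
          PySem.Dict.get?_insert_of_ne last s (show ("A":String) ≠ "G" by decide),
          PySem.Dict.get?_insert_of_ne last s (show ("C":String) ≠ "G" by decide),
          adjTail_some_cons]
      · rw [if_neg hc]
        simp only [Bool.not_eq_true] at hc
        have hself : "GDiff" ∉ afterFirst xs "G" := by simpa [hc, afterSecond_cons_self] using hG
        have hG' : "GDiff" ∉ (if (last.insert "G" s).contains "G" then afterFirst xs "G" else afterSecond xs "G") := by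
          simpa only [PySem.Dict.contains_insert_self, if_true] using hself
        have hT' : "TDiff" ∉ (if (last.insert "G" s).contains "T" then afterFirst xs "T" else afterSecond xs "T") := by
          simpa [PySem.Dict.contains_insert, afterFirst_cons_ne "G" "T" xs (by decide),
            afterSecond_cons_ne "G" "T" xs (by decide)] using hT
        have hA' : "ADiff" ∉ (if (last.insert "G" s).contains "A" then afterFirst xs "A" else afterSecond xs "A") := by
          simpa [PySem.Dict.contains_insert, afterFirst_cons_ne "G" "A" xs (by decide),
            afterSecond_cons_ne "G" "A" xs (by decide)] using hA
        have hC' : "CDiff" ∉ (if (last.insert "G" s).contains "C" then afterFirst xs "C" else afterSecond xs "C") := by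
          simpa [PySem.Dict.contains_insert, afterFirst_cons_ne "G" "C" xs (by decide),
            afterSecond_cons_ne "G" "C" xs (by decide)] using hC
        rw [modify_mk8_G, ih hxs' (s+1) _ _ _ _ _ _ _ _ _ hT' hA' hC' hG']
        rw [get?_of_contains_false _ _ hc]
        simp [posF_cons, PySem.Dict.get?_insert_self,
          PySem.Dict.get?_insert_of_ne last s (show ("T":String) ≠ "G" by decide),
          PySem.Dict.get?_insert_of_ne last s (show ("A":String) ≠ "G" by decide),
          PySem.Dict.get?_insert_of_ne last s (show ("C":String) ≠ "G" by decide),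
          adjTail_none_cons]
    · simp only [pvStepB]
      rw [if_neg (show ¬ ("TDiff":String) ∈ (["T","A","C","G"] : List String) by decide)]
      rw [modify_mk8_TD_lit]
      have hT' : "TDiff" ∉ (if last.contains "T" then afterFirst xs "T" else afterSecond xs "T") := by
        simpa [afterFirst_cons_ne "TDiff" "T" xs (by decide),
          afterSecond_cons_ne "TDiff" "T" xs (by decide)] using hT
      have hA' : "ADiff" ∉ (if last.contains "A" then afterFirst xs "A" else afterSecond xs "A") := by
        simpa [afterFirst_cons_ne "TDiff" "A" xs (by decide),
          afterSecond_cons_ne "TDiff" "A" xs (by decide)] using hA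
      have hC' : "CDiff" ∉ (if last.contains "C" then afterFirst xs "C" else afterSecond xs "C") := by
        simpa [afterFirst_cons_ne "TDiff" "C" xs (by decide),
          afterSecond_cons_ne "TDiff" "C" xs (by decide)] using hC
      have hG' : "GDiff" ∉ (if last.contains "G" then afterFirst xs "G" else afterSecond xs "G") := by
        simpa [afterFirst_cons_ne "TDiff" "G" xs (by decide),
          afterSecond_cons_ne "TDiff" "G" xs (by decide)] using hG
      rw [ih hxs' (s+1) _ _ _ _ _ _ _ _ _ hT' hA' hC' hG']
      simp [posF_cons]
    · simp only [pvStepB]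
      rw [if_neg (show ¬ ("ADiff":String) ∈ (["T","A","C","G"] : List String) by decide)]
      rw [modify_mk8_AD_lit]
      have hT' : "TDiff" ∉ (if last.contains "T" then afterFirst xs "T" else afterSecond xs "T") := by
        simpa [afterFirst_cons_ne "ADiff" "T" xs (by decide),
          afterSecond_cons_ne "ADiff" "T" xs (by decide)] using hT
      have hA' : "ADiff" ∉ (if last.contains "A" then afterFirst xs "A" else afterSecond xs "A") := by
        simpa [afterFirst_cons_ne "ADiff" "A" xs (by decide),
          afterSecond_cons_ne "ADiff" "A" xs (by decide)] using hA
      have hC' : "CDiff" ∉ (if last.contains "C" then afterFirst xs "C" else afterSecond xs "C") := by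
        simpa [afterFirst_cons_ne "ADiff" "C" xs (by decide),
          afterSecond_cons_ne "ADiff" "C" xs (by decide)] using hC
      have hG' : "GDiff" ∉ (if last.contains "G" then afterFirst xs "G" else afterSecond xs "G") := by
        simpa [afterFirst_cons_ne "ADiff" "G" xs (by decide),
          afterSecond_cons_ne "ADiff" "G" xs (by decide)] using hG
      rw [ih hxs' (s+1) _ _ _ _ _ _ _ _ _ hT' hA' hC' hG']
      simp [posF_cons]
    · simp only [pvStepB]
      rw [if_neg (show ¬ ("CDiff":String) ∈ (["T","A","C","G"] : List String) by decide)]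
      rw [modify_mk8_CD_lit]
      have hT' : "TDiff" ∉ (if last.contains "T" then afterFirst xs "T" else afterSecond xs "T") := by
        simpa [afterFirst_cons_ne "CDiff" "T" xs (by decide),
          afterSecond_cons_ne "CDiff" "T" xs (by decide)] using hT
      have hA' : "ADiff" ∉ (if last.contains "A" then afterFirst xs "A" else afterSecond xs "A") := by
        simpa [afterFirst_cons_ne "CDiff" "A" xs (by decide),
          afterSecond_cons_ne "CDiff" "A" xs (by decide)] using hA
      have hC' : "CDiff" ∉ (if last.contains "C" then afterFirst xs "C" else afterSecond xs "C") := by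
        simpa [afterFirst_cons_ne "CDiff" "C" xs (by decide),
          afterSecond_cons_ne "CDiff" "C" xs (by decide)] using hC
      have hG' : "GDiff" ∉ (if last.contains "G" then afterFirst xs "G" else afterSecond xs "G") := by
        simpa [afterFirst_cons_ne "CDiff" "G" xs (by decide),
          afterSecond_cons_ne "CDiff" "G" xs (by decide)] using hG
      rw [ih hxs' (s+1) _ _ _ _ _ _ _ _ _ hT' hA' hC' hG']
      simp [posF_cons]
    · simp only [pvStepB]
      rw [if_neg (show ¬ ("GDiff":String) ∈ (["T","A","C","G"] : List String) by decide)]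
      rw [modify_mk8_GD_lit]
      have hT' : "TDiff" ∉ (if last.contains "T" then afterFirst xs "T" else afterSecond xs "T") := by
        simpa [afterFirst_cons_ne "GDiff" "T" xs (by decide),
          afterSecond_cons_ne "GDiff" "T" xs (by decide)] using hT
      have hA' : "ADiff" ∉ (if last.contains "A" then afterFirst xs "A" else afterSecond xs "A") := by
        simpa [afterFirst_cons_ne "GDiff" "A" xs (by decide),
          afterSecond_cons_ne "GDiff" "A" xs (by decide)] using hA
      have hC' : "CDiff" ∉ (if last.contains "C" then afterFirst xs "C" else afterSecond xs "C") := by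
        simpa [afterFirst_cons_ne "GDiff" "C" xs (by decide),
          afterSecond_cons_ne "GDiff" "C" xs (by decide)] using hC
      have hG' : "GDiff" ∉ (if last.contains "G" then afterFirst xs "G" else afterSecond xs "G") := by
        simpa [afterFirst_cons_ne "GDiff" "G" xs (by decide),
          afterSecond_cons_ne "GDiff" "G" xs (by decide)] using hG
      rw [ih hxs' (s+1) _ _ _ _ _ _ _ _ _ hT' hA' hC' hG']
      simp [posF_cons]

theorem ofList8 : (PySem.Dict.ofList
    [("T", ([]:List Int)), ("A", []), ("C", []), ("G", []), ("TDiff", []), ("ADiff", []), ("CDiff", []), ("GDiff", [])])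
    = mk8 [] [] [] [] [] [] [] [] := rfl

-- ===== VERDICT (by name: the statement is the Claim_ definition above) =====
theorem build_processed_chromosome_data_spec : Claim_equal_build_processed_chromosome_data := by
  intro xs _hdom hpre
  unfold Spec_build_processed_chromosome_data
  unfold Pre_build_processed_chromosome_data at hpre
  obtain ⟨hmem, h1, h2, h3, h4⟩ := hpre
  have bridge : (PySem.List.pyRange 0 (xs.length : Int) 1).foldl
      (fun d i => d.modify (PySem.List.pyGetD xs i "") [] (· ++ [i])) (mk8 [] [] [] [] [] [] [] [])
      = (PySem.List.enumerate xs 0).foldl (fun d p => d.modify p.2 [] (· ++ [p.1]))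
          (mk8 [] [] [] [] [] [] [] []) := by
    rw [PySem.List.enumerate_eq_map_pyRange (d := ""), List.foldl_map]
    rfl
  unfold build_processed_chromosome_data build_processed_chromosome_data_alt
  simp only [ofList8]
  rw [bridge, A_loop1 xs hmem 0,
    B_loop xs hmem 0 [] [] [] [] [] [] [] [] PySem.Dict.empty
      (by simpa [PySem.Dict.contains_empty] using h1)
      (by simpa [PySem.Dict.contains_empty] using h2)
      (by simpa [PySem.Dict.contains_empty] using h3)
      (by simpa [PySem.Dict.contains_empty] using h4)]
  simp only [PySem.Dict.get?_empty, List.foldl_cons, List.foldl_nil,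
    diffStepA_T, diffStepA_A, diffStepA_C, diffStepA_G, adjTail_none, List.nil_append]
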